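-- pv_equiv track=rewrite | github.com/summer2293/algorithm-study | src/kokihoon/programmers/62048.py | solution
-- ===== SOURCE A (Python) =====
-- def solution(w,h):
--     if(w == h):
--         return w*h-w
--     else :
--         a = w
--         b = h
--         # 최대 공약수 구하는부분 start
--         if b>a:
--             tmp = a
--             a = b
--             b = tmp
--         while b>0:
--             c = b
--             b = a % b
--             a = c
--         # end
--         return w*h - (w+h-a)
-- ===== SOURCE B (Python) =====
-- def solution(w, h):
--     # Recursive Euclidean helper over the same a % b recurrence; no special
--     # w == h branch: gcd-like g(w, w) = w makes the formula reduce to w*h - w.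
--     def g(a, b):
--         return a if b <= 0 else g(b, a % b)
--     return w * h - (w + h - g(max(w, h), min(w, h)))
-- ===== Notes on version B (the rewrite author's own statement) =====
-- stated objective: simpler
-- what changed: Replaces A's w==h special case plus explicit swap-and-while Euclidean loop by a single closed formula over a small recursive Euclidean helper g(max(w,h),min(w,h)).
import Mathlib
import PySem

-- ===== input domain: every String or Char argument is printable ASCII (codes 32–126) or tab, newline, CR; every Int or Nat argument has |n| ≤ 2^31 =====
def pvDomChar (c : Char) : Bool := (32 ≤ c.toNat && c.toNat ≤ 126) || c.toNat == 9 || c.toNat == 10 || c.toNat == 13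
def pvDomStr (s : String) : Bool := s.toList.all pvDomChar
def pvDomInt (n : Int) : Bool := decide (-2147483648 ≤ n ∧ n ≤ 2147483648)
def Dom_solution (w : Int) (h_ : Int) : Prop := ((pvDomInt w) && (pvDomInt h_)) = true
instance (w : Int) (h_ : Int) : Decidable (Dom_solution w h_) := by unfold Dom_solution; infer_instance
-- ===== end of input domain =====

-- B replaces A's w==h special case and swap-and-while Euclidean loop by one
-- formula over a small recursive Euclidean helper (objective: simpler).

-- ===== PORT A =====
-- A's while-loop: while b > 0: c = b; b = a % b; a = c
def solutionLoop (a b : Int) : Int :=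
  if hb : b > 0 then solutionLoop b (PySem.Int.mod a b) else a
termination_by b.toNat
decreasing_by
  rw [PySem.Int.mod_eq_emod_of_pos hb]
  have h1 := Int.emod_nonneg a (ne_of_gt hb)
  have h2 := Int.emod_lt_of_pos a hb
  omega

def solution (w : Int) (h_ : Int) : Int :=
  if w = h_ then w * h_ - w
  else
    let a := w
    let b := h_
    let p := if b > a then (b, a) else (a, b)
    let a := solutionLoop p.1 p.2
    w * h_ - (w + h_ - a)

-- ===== PORT B =====
-- Source B's g(a, b) = a if b <= 0 else g(b, a % b)
def altG (a b : Int) : Int :=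
  if hb : b ≤ 0 then a else altG b (PySem.Int.mod a b)
termination_by b.toNat
decreasing_by
  have hb' : 0 < b := by omega
  rw [PySem.Int.mod_eq_emod_of_pos hb']
  have h1 := Int.emod_nonneg a (by omega : b ≠ 0)
  have h2 := Int.emod_lt_of_pos a hb'
  omega

def solution_alt (w : Int) (h_ : Int) : Int :=
  w * h_ - (w + h_ - altG (max w h_) (min w h_))

-- ===== PRECONDITION & SPEC =====
def Spec_solution (w : Int) (h_ : Int) (out : Int) : Prop := out = solution_alt w h_
instance (w : Int) (h_ : Int) (out : Int) : Decidable (Spec_solution w h_ out) := by unfold Spec_solution; infer_instance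

-- ===== CLAIM (what is proved, stated in full; the proofs are below) =====
def Claim_equal_solution : Prop := ∀ (w : Int) (h_ : Int), Dom_solution w h_ → Spec_solution w h_ (solution w h_)

-- ===== LEMMAS AND PROOFS =====

theorem loop_eq_altG (a b : Int) : solutionLoop a b = altG a b := by
  induction a, b using solutionLoop.induct with
  | case1 a b hb ih =>
      unfold solutionLoop altG
      rw [dif_pos hb, dif_neg (show ¬ b ≤ 0 by omega)]
      exact ih
  | case2 a b hb =>
      unfold solutionLoop altG
      rw [dif_neg hb, dif_pos (show b ≤ 0 by omega)]

theorem altG_self (w : Int) : altG w w = w := by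
  unfold altG
  by_cases hw : w ≤ 0
  · simp [hw]
  · have hm : PySem.Int.mod w w = 0 := by
      rw [PySem.Int.mod_eq_emod_of_pos (by omega)]
      exact Int.emod_self
    rw [dif_neg hw, hm]
    unfold altG
    rw [dif_pos le_rfl]

-- ===== VERDICT (by name: the statement is the Claim_ definition above) =====
theorem solution_spec : Claim_equal_solution := by
  intro w h_ _
  unfold Spec_solution solution solution_alt
  by_cases hwh : w = h_
  · subst hwh
    simp [altG_self]
  · simp only [if_neg hwh]
    rw [loop_eq_altG]
    by_cases hlt : h_ > w
    · simp [hlt, max_eq_right (le_of_lt hlt), min_eq_left (le_of_lt hlt)]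
    · have hle : h_ ≤ w := by omega
      simp [hlt, max_eq_left hle, min_eq_right hle]
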